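-- pv_equiv track=rewrite | github.com/pypi-data/pypi-mirror-402 | packages/marc-lint/marc_lint-0.0.4.tar.gz/marc_lint-0.0.4/src/marc_lint/linter.py | _is_valid_008_date
-- ===== SOURCE A (Python) =====
-- def _is_valid_008_date(date_str: str) -> bool:
--     """Check if an 008 date string is valid.
--
--     Valid formats:
--     - YYYY (4 digits, 0000-9999)
--     - '    ' (4 blanks)
--     - '||||' (no attempt to code)
--     - 'uuuu' (unknown)
--     - Partial unknowns like '19uu' or '199u'
--     """
--     if len(date_str) != 4:
--         return False
--
--     # All blanks is valid
--     if date_str == "    ":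
--         return True
--
--     # No attempt to code
--     if date_str == "||||":
--         return True
--
--     # Check for valid year pattern (digits and 'u' for unknown)
--     for char in date_str:
--         if char not in "0123456789u":
--             return False
--
--     return True
-- ===== SOURCE B (Python) =====
-- import re
--
-- _008_DATE_RE = re.compile(r"[0-9u]{4}| {4}|\|{4}")
--
-- def _is_valid_008_date(date_str: str) -> bool:
--     """Regex full-match over the three accepted alternatives."""
--     return _008_DATE_RE.fullmatch(date_str) is not None
-- ===== Notes on version B (the rewrite author's own statement) =====
-- stated objective: idiomatic
-- what changed: Replaced the length guard, two literal special-case branches and the per-character membership loop by a single anchored regex full-match over the three alternatives [0-9u]{4}, four blanks, four pipes.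
import Mathlib
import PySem

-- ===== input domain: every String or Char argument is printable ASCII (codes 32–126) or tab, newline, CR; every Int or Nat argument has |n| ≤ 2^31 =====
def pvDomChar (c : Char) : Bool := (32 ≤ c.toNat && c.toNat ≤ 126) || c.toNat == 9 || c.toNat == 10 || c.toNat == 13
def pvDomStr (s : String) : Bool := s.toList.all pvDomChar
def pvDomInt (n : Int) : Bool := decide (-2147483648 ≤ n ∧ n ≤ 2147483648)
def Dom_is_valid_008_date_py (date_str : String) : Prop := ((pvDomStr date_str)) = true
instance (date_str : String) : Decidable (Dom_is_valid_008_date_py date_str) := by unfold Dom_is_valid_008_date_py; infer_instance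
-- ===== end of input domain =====

-- B replaces A's length guard, literal branches and per-character loop by one anchored
-- regex full-match over the three alternatives (idiomatic; same cost).


-- ===== PORT A =====
-- A's per-character loop with early return False
def pyLoopA : List Char → Bool
  | [] => true
  | c :: rest => if ("0123456789u".toList.contains c) then pyLoopA rest else false

def is_valid_008_date_py (date_str : String) : Bool :=
  if PySem.Str.len date_str ≠ 4 then false
  else if date_str == "    " then true
  else if date_str == "||||" then true
  else pyLoopA date_str.toList

-- ===== PORT B =====
-- The regex fullmatch r"[0-9u]{4}| {4}|\|{4}" as a disjunction of the three
-- alternatives, each anchored to the whole string: [0-9u]{4} = exactly four chars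
-- each in [0-9u]; " {4}" / "\|{4}" = the literal four-char strings.
def pyRegexAlt1 (cs : List Char) : Bool :=
  cs.length == 4 && cs.all (fun c => "0123456789u".toList.contains c)

def is_valid_008_date_py_alt (date_str : String) : Bool :=
  pyRegexAlt1 date_str.toList || date_str == "    " || date_str == "||||"

-- ===== PRECONDITION & SPEC =====
def Spec_is_valid_008_date_py (date_str : String) (out : Bool) : Prop := out = is_valid_008_date_py_alt date_str
instance (date_str : String) (out : Bool) : Decidable (Spec_is_valid_008_date_py date_str out) := by unfold Spec_is_valid_008_date_py; infer_instance

-- ===== CLAIM (what is proved, stated in full; the proofs are below) =====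
def Claim_equal_is_valid_008_date_py : Prop := ∀ (date_str : String), Dom_is_valid_008_date_py date_str → Spec_is_valid_008_date_py date_str (is_valid_008_date_py date_str)

-- ===== LEMMAS AND PROOFS =====
theorem pyLoopA_eq_all (cs : List Char) :
    pyLoopA cs = cs.all (fun c => "0123456789u".toList.contains c) := by
  induction cs with
  | nil => rfl
  | cons c rest ih =>
    unfold pyLoopA
    rw [List.all_cons, ih]
    cases h : ("0123456789u".toList.contains c) <;> simp [h]

-- ===== VERDICT (by name: the statement is the Claim_ definition above) =====
theorem is_valid_008_date_py_spec : Claim_equal_is_valid_008_date_py := by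
  intro s _
  unfold Spec_is_valid_008_date_py is_valid_008_date_py is_valid_008_date_py_alt pyRegexAlt1
  rw [pyLoopA_eq_all, PySem.Str.len_eq]
  by_cases hb : s = "    "
  · subst hb; decide
  by_cases hp : s = "||||"
  · subst hp; decide
  have hb' : (s == "    ") = false := by simp [hb]
  have hp' : (s == "||||") = false := by simp [hp]
  simp only [hb', hp', Bool.or_false]
  simp only [ite_not]
  split_ifs with h <;> simp_all <;> omega
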